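-- pv_equiv track=rewrite | github.com/eli-junior/exercicios | advent_of_code_2023/day_2/resolution.py | set_power
-- ===== SOURCE A (Python) =====
-- def set_power(game):
--     red = 1
--     green = 1
--     blue = 1
--     for g in game:
--         red = g['red'] if g['red'] > red else red
--         green = g['green'] if g['green'] > green else green
--         blue = g['blue'] if g['blue'] > blue else blue
--     return red * green * blue
-- ===== SOURCE B (Python) =====
-- def set_power(game):
--     power = 1
--     for color in ("red", "green", "blue"):
--         power *= sorted([1] + [g[color] for g in game])[-1]
--     return power
-- ===== Notes on version B (the rewrite author's own statement) =====
-- stated objective: alternative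
-- what changed: Replaces the fused loop maintaining three running maxima with one loop over the three colour names that, per colour, collects the values, sorts them with the seed 1 and takes the last element as that colour's maximum, multiplying into the result.
import Mathlib
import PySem

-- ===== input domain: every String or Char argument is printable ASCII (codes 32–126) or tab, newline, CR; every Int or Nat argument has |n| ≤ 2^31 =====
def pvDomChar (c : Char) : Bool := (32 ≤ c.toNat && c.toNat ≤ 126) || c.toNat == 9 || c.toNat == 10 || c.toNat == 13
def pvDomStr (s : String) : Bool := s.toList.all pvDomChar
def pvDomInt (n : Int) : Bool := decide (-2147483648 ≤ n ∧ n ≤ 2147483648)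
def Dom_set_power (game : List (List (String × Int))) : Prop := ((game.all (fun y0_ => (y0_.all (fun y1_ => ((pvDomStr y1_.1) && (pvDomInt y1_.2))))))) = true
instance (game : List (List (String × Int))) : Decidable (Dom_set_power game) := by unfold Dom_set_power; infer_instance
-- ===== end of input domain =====

-- B replaces A's fused three-accumulator loop by a loop over the colour names that sorts
-- each colour's values (seeded with 1) and takes the last element (objective: alternative).
-- ===== PORT A =====
-- g[k] on a dict (assoc list, first match); Pre_ guarantees the key is present, so the 0 default never fires
def pvLookupD (g : List (String × Int)) (k : String) : Int :=
  ((g.find? (fun p => p.1 == k)).map Prod.snd).getD 0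

def set_power (game : List (List (String × Int))) : Int :=
  let s := game.foldl
    (fun (st : Int × Int × Int) g =>
      let r := pvLookupD g "red"
      let gr := pvLookupD g "green"
      let b := pvLookupD g "blue"
      ((if r > st.1 then r else st.1),
       (if gr > st.2.1 then gr else st.2.1),
       (if b > st.2.2 then b else st.2.2)))
    (1, 1, 1)
  s.1 * s.2.1 * s.2.2

-- ===== PORT B =====
-- power *= sorted([1] + [g[color] for g in game])[-1], for color in ("red","green","blue")
def set_power_alt (game : List (List (String × Int))) : Int :=
  ["red", "green", "blue"].foldl
    (fun power color =>
      power * (PySem.List.pyGet? (PySem.List.sorted (1 :: game.map (fun g => pvLookupD g color))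
                  (fun x => x) false) (-1)).getD 0)
    1

-- ===== PRECONDITION & SPEC =====
-- Pre_ excludes games containing a set missing a 'red'/'green'/'blue' key, on which A (and B) raise KeyError.
def Pre_set_power (game : List (List (String × Int))) : Prop :=
  ∀ g ∈ game, "red" ∈ g.map Prod.fst ∧ "green" ∈ g.map Prod.fst ∧ "blue" ∈ g.map Prod.fst
instance (game : List (List (String × Int))) : Decidable (Pre_set_power game) := by
  unfold Pre_set_power; infer_instance
def pvWitness_set_power : (List (List (String × Int))) :=
  [[("red", 4), ("green", 2), ("blue", 6)], [("red", 1), ("green", 3), ("blue", 4)],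
   [("red", 2), ("green", 5), ("blue", 1)], [("red", 6), ("green", 1), ("blue", 2)]]
def Spec_set_power (game : List (List (String × Int))) (out : Int) : Prop := out = set_power_alt game
instance (game : List (List (String × Int))) (out : Int) : Decidable (Spec_set_power game out) := by unfold Spec_set_power; infer_instance

-- ===== CLAIM (what is proved, stated in full; the proofs are below) =====
def Claim_equal_set_power : Prop := ∀ (game : List (List (String × Int))), Dom_set_power game → Pre_set_power game → Spec_set_power game (set_power game)

-- ===== LEMMAS AND PROOFS =====
theorem foldl_max_mem (xs : List Int) (a : Int) : xs.foldl max a ∈ a :: xs := by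
  induction xs generalizing a with
  | nil => simp
  | cons x t ih =>
    simp only [List.foldl_cons]
    rcases List.mem_cons.mp (ih (max a x)) with h | h
    · rcases max_choice a x with hm | hm
      · exact List.mem_cons.mpr (Or.inl (by rw [h, hm]))
      · exact List.mem_cons.mpr (Or.inr (List.mem_cons.mpr (Or.inl (by rw [h, hm]))))
    · exact List.mem_cons.mpr (Or.inr (List.mem_cons.mpr (Or.inr h)))

theorem pairwise_le_getLast (l : List Int) (h : l ≠ []) (x : Int)
    (hp : l.Pairwise (· ≤ ·)) (hx : x ∈ l) : x ≤ l.getLast h := by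
  induction l with
  | nil => simp at hx
  | cons y t ih =>
    rcases List.pairwise_cons.mp hp with ⟨hy, ht⟩
    rcases List.mem_cons.mp hx with rfl | hx
    · rcases t with _ | ⟨z, t'⟩
      · simp
      · rw [List.getLast_cons (by simp)]
        exact hy _ (List.getLast_mem _)
    · have hne : t ≠ [] := List.ne_nil_of_mem hx
      rw [List.getLast_cons hne]
      exact ih hne ht hx

theorem pyGet_neg_one (l : List Int) (h : l ≠ []) :
    PySem.List.pyGet? l (-1) = some (l.getLast h) := by
  have hl : 0 < l.length := List.length_pos_iff.mpr h
  simp only [PySem.List.pyGet?, PySem.List.pyIdx?]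
  rw [if_neg (by omega), if_pos (by omega)]
  simp only [Option.bind_some]
  rw [List.getLast_eq_getElem, List.getElem?_eq_getElem (by omega)]
  norm_num

-- sorted([1] + vals)[-1] is the running maximum of vals seeded with 1
theorem sorted_last_eq_foldl_max (xs : List Int) :
    (PySem.List.pyGet? (PySem.List.sorted (1 :: xs) (fun x => x) false) (-1)).getD 0
      = xs.foldl max 1 := by
  have hperm : (PySem.List.sorted (1 :: xs) (fun x => x) false).Perm (1 :: xs) :=
    PySem.List.sorted_perm _ _ _
  have hne : PySem.List.sorted (1 :: xs) (fun x => x) false ≠ [] := by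
    intro hnil
    have := hperm.length_eq
    rw [hnil] at this
    simp at this
  rw [pyGet_neg_one _ hne, Option.getD_some]
  have hpair : (PySem.List.sorted (1 :: xs) (fun x => x) false).Pairwise (· ≤ ·) := by
    have := PySem.List.sorted_pairwise (1 :: xs) (fun x => x)
    simpa using this
  apply le_antisymm
  · -- the last element is a member of 1 :: xs, hence ≤ the fold
    have hmem : (PySem.List.sorted (1 :: xs) (fun x => x) false).getLast hne ∈ 1 :: xs :=
      hperm.mem_iff.mp (List.getLast_mem hne)
    rcases List.mem_cons.mp hmem with h | h
    · rw [h]; exact (PySem.List.le_foldl_max xs 1).1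
    · exact (PySem.List.le_foldl_max xs 1).2 _ h
  · -- the fold is a member of the sorted list, hence ≤ its last element
    have hmem : xs.foldl max 1 ∈ PySem.List.sorted (1 :: xs) (fun x => x) false :=
      hperm.symm.mem_iff.mp (foldl_max_mem xs 1)
    exact pairwise_le_getLast _ hne _ hpair hmem

theorem set_power_fold_eq (game : List (List (String × Int))) (s1 s2 s3 : Int) :
    game.foldl
      (fun (st : Int × Int × Int) g =>
        let r := pvLookupD g "red"
        let gr := pvLookupD g "green"
        let b := pvLookupD g "blue"
        ((if r > st.1 then r else st.1),
         (if gr > st.2.1 then gr else st.2.1),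
         (if b > st.2.2 then b else st.2.2))) (s1, s2, s3)
    = ((game.map (fun g => pvLookupD g "red")).foldl max s1,
       (game.map (fun g => pvLookupD g "green")).foldl max s2,
       (game.map (fun g => pvLookupD g "blue")).foldl max s3) := by
  induction game generalizing s1 s2 s3 with
  | nil => simp
  | cons g t ih =>
    simp only [List.foldl_cons, List.map_cons, ih]
    congr 1 <;> [skip; congr 1] <;> · congr 1; omega

theorem set_power_spec_aux (game : List (List (String × Int))) :
    set_power game = set_power_alt game := by
  simp only [set_power, set_power_alt, set_power_fold_eq, List.foldl_cons, List.foldl_nil,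
    sorted_last_eq_foldl_max, one_mul]

-- ===== VERDICT (by name: the statement is the Claim_ definition above) =====
theorem set_power_spec : Claim_equal_set_power := by
  intro game _ _
  unfold Spec_set_power
  exact set_power_spec_aux game
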